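-- pv_equiv track=rewrite | github.com/mathias-caillard/dashboard-tsp | src/functions/fonction_figure.py | adapt_title_y
-- ===== SOURCE A (Python) =====
-- def adapt_title_y(title_y):
--     if len(title_y) > 48:
--         i = 48
--         while i > 0 and title_y[i] != " ":
--             i -= 1
--         if i > 0:
--             title_y = title_y[:i] + "<br>" + adapt_title_y(title_y[i + 1:])
--     return title_y
-- ===== SOURCE B (Python) =====
-- def adapt_title_y(title_y):
--     parts = []
--     while len(title_y) > 48:
--         i = 48
--         while i > 0 and title_y[i] != " ":
--             i -= 1
--         if i == 0:
--             break
--         parts.append(title_y[:i])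
--         title_y = title_y[i + 1:]
--     parts.append(title_y)
--     return "<br>".join(parts)
-- ===== Notes on version B (the rewrite author's own statement) =====
-- stated objective: simpler
-- what changed: Replaced A's self-recursion (each level re-concatenating the growing result) by a single iterative while-loop that collects the line segments in a list and joins them once with the line-break separator.
import Mathlib
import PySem

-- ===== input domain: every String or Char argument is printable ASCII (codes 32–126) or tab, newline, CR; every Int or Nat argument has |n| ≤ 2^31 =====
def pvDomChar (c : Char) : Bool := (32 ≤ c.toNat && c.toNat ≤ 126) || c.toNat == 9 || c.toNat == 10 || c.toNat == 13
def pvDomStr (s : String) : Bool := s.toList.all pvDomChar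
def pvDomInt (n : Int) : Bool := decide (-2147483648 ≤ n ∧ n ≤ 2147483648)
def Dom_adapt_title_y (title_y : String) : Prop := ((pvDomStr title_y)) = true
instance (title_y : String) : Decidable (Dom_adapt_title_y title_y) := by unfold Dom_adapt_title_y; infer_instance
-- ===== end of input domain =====

-- B replaces A's recursion by an iterative loop collecting parts and joining with "<br>" (objective: simpler/alternative).


-- ===== PORT A =====
-- the `while i > 0 and title_y[i] != " "` scan, decrementing i (index always in range since i ≤ 48 < len)
def pvFindSpA (l : List Char) : Nat → Nat
  | 0 => 0
  | i+1 => if l.getD (i+1) ' ' ≠ ' ' then pvFindSpA l i else i+1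

def pvAdaptA (l : List Char) : List Char :=
  if _h : l.length > 48 then
    let i := pvFindSpA l 48
    if i > 0 then l.take i ++ ['<','b','r','>'] ++ pvAdaptA (l.drop (i+1)) else l
  else l
termination_by l.length
decreasing_by simp; omega

def adapt_title_y (title_y : String) : String := String.mk (pvAdaptA title_y.toList)

-- ===== PORT B =====
def pvFindSpB (l : List Char) : Nat → Nat
  | 0 => 0
  | i+1 => if l.getD (i+1) ' ' ≠ ' ' then pvFindSpB l i else i+1

-- the `while len(title_y) > 48` loop, accumulating `parts` (final `parts.append(title_y)` included)
def pvGoB (l : List Char) (parts : List (List Char)) : List (List Char) :=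
  if _h : l.length > 48 then
    let i := pvFindSpB l 48
    if i == 0 then parts ++ [l]
    else pvGoB (l.drop (i+1)) (parts ++ [l.take i])
  else parts ++ [l]
termination_by l.length
decreasing_by simp; omega

-- "<br>".join
def pvJoinBr : List (List Char) → List Char
  | [] => []
  | [x] => x
  | x :: y :: ys => x ++ ['<','b','r','>'] ++ pvJoinBr (y :: ys)

def adapt_title_y_alt (title_y : String) : String := String.mk (pvJoinBr (pvGoB title_y.toList []))

-- ===== PRECONDITION & SPEC =====
def Spec_adapt_title_y (title_y : String) (out : String) : Prop := out = adapt_title_y_alt title_y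
instance (title_y : String) (out : String) : Decidable (Spec_adapt_title_y title_y out) := by unfold Spec_adapt_title_y; infer_instance

-- ===== CLAIM (what is proved, stated in full; the proofs are below) =====
def Claim_equal_adapt_title_y : Prop := ∀ (title_y : String), Dom_adapt_title_y title_y → Spec_adapt_title_y title_y (adapt_title_y title_y)

-- ===== LEMMAS AND PROOFS =====

lemma pvJoinBr_cons (x : List Char) (ys : List (List Char)) (h : ys ≠ []) :
    pvJoinBr (x :: ys) = x ++ ['<','b','r','>'] ++ pvJoinBr ys := by
  cases ys with
  | nil => exact absurd rfl h
  | cons y ys => rfl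

lemma pvJoinBr_snoc2 (ps : List (List Char)) (a b : List Char) :
    pvJoinBr (ps ++ [a, b]) = pvJoinBr (ps ++ [a ++ ['<','b','r','>'] ++ b]) := by
  induction ps with
  | nil => rfl
  | cons x ps ih =>
      rw [List.cons_append, List.cons_append,
          pvJoinBr_cons x (ps ++ [a, b]) (by simp),
          pvJoinBr_cons x (ps ++ [a ++ ['<','b','r','>'] ++ b]) (by simp), ih]

lemma pvFindSp_eq (l : List Char) (i : Nat) : pvFindSpB l i = pvFindSpA l i := by
  induction i with
  | zero => rfl
  | succ i ih => simp [pvFindSpA, pvFindSpB, ih]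

lemma pvGoB_join (l : List Char) (parts : List (List Char)) :
    pvJoinBr (pvGoB l parts) = pvJoinBr (parts ++ [pvAdaptA l]) := by
  rw [pvGoB, pvAdaptA]
  by_cases h : l.length > 48
  · simp only [h, dif_pos, pvFindSp_eq]
    by_cases hi : pvFindSpA l 48 = 0
    · simp [hi]
    · simp only [hi, beq_iff_eq, if_false, if_pos (Nat.pos_of_ne_zero hi)]
      rw [pvGoB_join (l.drop (pvFindSpA l 48 + 1)) (parts ++ [l.take (pvFindSpA l 48)]),
          List.append_assoc]
      exact pvJoinBr_snoc2 parts _ _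
  · simp [h]
termination_by l.length
decreasing_by simp; omega

-- ===== VERDICT (by name: the statement is the Claim_ definition above) =====
theorem adapt_title_y_spec : Claim_equal_adapt_title_y := by
  intro s _
  unfold Spec_adapt_title_y adapt_title_y adapt_title_y_alt
  rw [pvGoB_join, List.nil_append]
  rfl
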